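-- pv_equiv track=rewrite | github.com/Deependrashukla/MyWorks | previous year/2ndYear/sem4/adsa/maximal_points.py | leftRight
-- ===== SOURCE A (Python) =====
-- def leftRight(input):
--     maximalPoints = []  # Initialize an empty list to store maximal points
--     steps = 0  # Initialize a counter to keep track of the number of steps taken
--     for i in input:  # Iterate over each point in the input list
--         steps += 1  # Increment the step counter
--         while len(maximalPoints) > 0 and maximalPoints[-1][1] <= i[1]:  # Check if the current point is greater than the top of the stack
--             steps += 1  # Increment the step counter
--             maximalPoints.pop()  # Pop the top of the stack until it is empty or the top of the stack has a greater y-coordinate than the current point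
--         maximalPoints.append(i)  # Append the current point to the stack
--
--     return maximalPoints, steps  # Return the list of maximal points and the number of steps taken
-- ===== SOURCE B (Python) =====
-- def leftRight(input):
--     picked = []
--     best = None
--     for p in reversed(input):
--         if best is None or p[1] > best:
--             picked.append(p)
--             best = p[1]
--     picked.reverse()
--     return picked, 2 * len(input) - len(picked)
-- ===== Notes on version B (the rewrite author's own statement) =====
-- stated objective: alternative
-- what changed: Replaced the monotonic stack with pops by a single right-to-left scan keeping a running maximum y; a point is maximal iff its y strictly exceeds that maximum, and steps come from the closed form 2*len(input) - len(result).
import Mathlib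
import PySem

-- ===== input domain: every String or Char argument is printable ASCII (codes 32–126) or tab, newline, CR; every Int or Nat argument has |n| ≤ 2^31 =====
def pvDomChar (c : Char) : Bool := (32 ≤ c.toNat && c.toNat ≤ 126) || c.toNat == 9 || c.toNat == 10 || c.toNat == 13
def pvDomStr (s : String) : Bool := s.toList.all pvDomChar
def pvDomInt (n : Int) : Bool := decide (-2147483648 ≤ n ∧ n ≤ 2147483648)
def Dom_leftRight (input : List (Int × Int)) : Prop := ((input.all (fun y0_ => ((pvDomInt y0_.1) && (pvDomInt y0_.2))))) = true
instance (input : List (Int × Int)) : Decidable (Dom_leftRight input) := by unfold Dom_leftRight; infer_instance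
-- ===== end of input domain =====

-- B replaces A's monotonic stack (with its inner pop loop) by a single right-to-left
-- scan with a running maximum y and the closed form steps = 2*len(input) - len(result);
-- objective: alternative algorithm of the same cost.

-- ===== PORT A =====
-- the inner `while` loop: pops from the end while the top's y ≤ v, returning the
-- remaining stack and the number of pops (each pop did `steps += 1`)
def aPop : List (Int × Int) → Int → (List (Int × Int)) × Nat
  | s, v =>
    if h : s.getLast?.any (fun p => p.2 ≤ v) then
      let r := aPop s.dropLast v
      (r.1, r.2 + 1)
    else (s, 0)
  termination_by s _ => s.length
  decreasing_by
    have hne : s ≠ [] := by intro e; subst e; simp at h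
    have := List.length_pos_iff.mpr hne
    simp [List.length_dropLast]; omega

-- one iteration of A's `for` loop over (maximalPoints, steps)
def aStep (st : List (Int × Int) × Int) (i : Int × Int) : List (Int × Int) × Int :=
  let steps := st.2 + 1
  let pr := aPop st.1 i.2
  (pr.1 ++ [i], steps + (pr.2 : Int))

def leftRight (input : List (Int × Int)) : (List (Int × Int)) × Int :=
  input.foldl aStep ([], 0)

-- ===== PORT B =====
-- one iteration of B's loop over `reversed(input)`, state (picked, best)
def bStep (st : List (Int × Int) × Option Int) (p : Int × Int) : List (Int × Int) × Option Int :=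
  match st.2 with
  | none => (st.1 ++ [p], some p.2)
  | some m => if p.2 > m then (st.1 ++ [p], some p.2) else (st.1, some m)

def leftRight_alt (input : List (Int × Int)) : (List (Int × Int)) × Int :=
  let st := input.reverse.foldl bStep ([], none)
  let res := st.1.reverse
  (res, 2 * (input.length : Int) - (res.length : Int))

-- ===== PRECONDITION & SPEC =====
def Spec_leftRight (input : List (Int × Int)) (out : (List (Int × Int)) × Int) : Prop := out = leftRight_alt input
instance (input : List (Int × Int)) (out : (List (Int × Int)) × Int) : Decidable (Spec_leftRight input out) := by unfold Spec_leftRight; infer_instance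

-- ===== CLAIM (what is proved, stated in full; the proofs are below) =====
def Claim_equal_leftRight : Prop := ∀ (input : List (Int × Int)), Dom_leftRight input → Spec_leftRight input (leftRight input)

-- ===== LEMMAS AND PROOFS =====

-- the common specification: a point is kept iff its y strictly exceeds every later y
def S : List (Int × Int) → List (Int × Int)
  | [] => []
  | x :: xs => if xs.all (fun q => q.2 < x.2) then x :: S xs else S xs

-- running maximum of the y-coordinates
def maxY : List (Int × Int) → Option Int
  | [] => none
  | x :: xs => some (match maxY xs with | none => x.2 | some m => max x.2 m)

theorem maxY_eq_none (xs : List (Int × Int)) : maxY xs = none ↔ xs = [] := by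
  cases xs <;> simp [maxY]

theorem maxY_spec (xs : List (Int × Int)) (m : Int) (hm : maxY xs = some m) (v : Int) :
    m < v ↔ ∀ q ∈ xs, q.2 < v := by
  induction xs generalizing m with
  | nil => simp [maxY] at hm
  | cons x xs ih =>
    simp only [maxY, Option.some.injEq] at hm
    cases h : maxY xs with
    | none =>
      rw [h] at hm
      have : xs = [] := (maxY_eq_none xs).mp h
      subst this; subst hm; simp
    | some m' =>
      rw [h] at hm; subst hm
      simp only [max_lt_iff, List.mem_cons]
      constructor
      · rintro ⟨h1, h2⟩ q (rfl | hq)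
        · exact h1
        · exact ((ih m' h).mp h2) q hq
      · intro hq
        exact ⟨hq x (Or.inl rfl), (ih m' h).mpr (fun q hqq => hq q (Or.inr hqq))⟩

theorem bFold_eq (xs : List (Int × Int)) :
    xs.foldr (fun p st => bStep st p) ([], none) = ((S xs).reverse, maxY xs) := by
  induction xs with
  | nil => simp [S, maxY]
  | cons x xs ih =>
    rw [List.foldr_cons, ih]
    cases h : maxY xs with
    | none =>
      have : xs = [] := (maxY_eq_none xs).mp h
      subst this; simp [bStep, S, maxY]
    | some m =>
      have hall : (xs.all (fun q => decide (q.2 < x.2))) = decide (m < x.2) := by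
        by_cases hc : m < x.2
        · have := (maxY_spec xs m h x.2).mp hc
          simp only [hc, decide_true, List.all_eq_true]
          intro q hq; exact decide_eq_true (this q hq)
        · have hnotall : ¬ ∀ q ∈ xs, q.2 < x.2 := fun hf => hc ((maxY_spec xs m h x.2).mpr hf)
          simp only [hc, decide_false]
          rw [List.all_eq_false]
          push_neg at hnotall
          obtain ⟨q, hq1, hq2⟩ := hnotall
          exact ⟨q, hq1, by simpa using hq2⟩
      simp only [bStep, S, hall, maxY, h]
      by_cases hc : m < x.2
      · simp [hc, max_eq_left (le_of_lt hc)]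
      · simp [hc, not_lt.mp hc]

theorem aPop_eq (v : Int) (s : List (Int × Int)) (hs : s.Pairwise (fun p q => q.2 < p.2)) :
    aPop s v = (s.filter (fun p => v < p.2),
                s.length - (s.filter (fun p => v < p.2)).length) := by
  induction s using List.reverseRecOn with
  | nil => rw [aPop]; simp
  | append_singleton s p ih =>
    have hpa := List.pairwise_append.mp hs
    rw [aPop]
    by_cases hle : p.2 ≤ v
    · rw [dif_pos (by simp [hle])]
      simp only [List.dropLast_concat]
      rw [ih hpa.1]
      have hf : (s ++ [p]).filter (fun q => decide (v < q.2)) =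
          s.filter (fun q => decide (v < q.2)) := by
        rw [List.filter_append]
        simp [not_lt.mpr hle]
      rw [hf]
      have hlen := List.length_filter_le (fun q => decide (v < q.2)) s
      simp only [List.length_append, List.length_cons, List.length_nil]
      rw [Prod.mk.injEq]
      exact ⟨rfl, by omega⟩
    · rw [dif_neg (by simp [hle])]
      have hvp : v < p.2 := lt_of_not_ge hle
      have hf : (s ++ [p]).filter (fun q => decide (v < q.2)) = s ++ [p] := by
        apply List.filter_eq_self.mpr
        intro a ha
        rcases List.mem_append.mp ha with h1 | h1
        · have : p.2 < a.2 := hpa.2.2 a h1 p (List.mem_singleton_self p)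
          simp; omega
        · simp at h1; subst h1; simp [hvp]
      rw [hf]; simp

theorem aFold_eq (xs : List (Int × Int)) :
    ∀ (s : List (Int × Int)) (t : Int), s.Pairwise (fun p q => q.2 < p.2) →
    xs.foldl aStep (s, t) =
      (s.filter (fun p => xs.all (fun q => q.2 < p.2)) ++ S xs,
       t + 2 * (xs.length : Int) + (s.length : Int)
         - ((s.filter (fun p => xs.all (fun q => q.2 < p.2))).length : Int)
         - ((S xs).length : Int)) := by
  induction xs with
  | nil =>
    intro s t hs
    simp [S]
  | cons x xs ih =>
    intro s t hs
    rw [List.foldl_cons]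
    have hstep : aStep (s, t) x =
        (s.filter (fun p => x.2 < p.2) ++ [x],
         t + 1 + ((s.length - (s.filter (fun p => x.2 < p.2)).length : Nat) : Int)) := by
      simp [aStep, aPop_eq x.2 s hs]
    rw [hstep]
    have hsub : s.Pairwise (fun p q => q.2 < p.2) →
        (s.filter (fun p => x.2 < p.2)).Pairwise (fun p q => q.2 < p.2) :=
      fun h => h.filter _
    have hmem : ∀ a ∈ s.filter (fun p => x.2 < p.2), x.2 < a.2 := by
      intro a ha
      have := List.of_mem_filter ha
      simpa using this
    have hpw : (s.filter (fun p => x.2 < p.2) ++ [x]).Pairwise (fun p q => q.2 < p.2) := by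
      rw [List.pairwise_append]
      refine ⟨hsub hs, List.pairwise_singleton _ _, ?_⟩
      intro a ha b hb
      simp at hb; subst hb
      exact hmem a ha
    rw [ih _ _ hpw]
    -- align the kept-prefix and the step counts
    have hff : (s.filter (fun p => x.2 < p.2)).filter (fun p => xs.all (fun q => q.2 < p.2)) =
        s.filter (fun p => (x :: xs).all (fun q => q.2 < p.2)) := by
      rw [List.filter_filter]
      apply List.filter_congr
      intro a _
      simp [Bool.and_comm]
    have hfapp : (s.filter (fun p => x.2 < p.2) ++ [x]).filter (fun p => xs.all (fun q => q.2 < p.2)) =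
        s.filter (fun p => (x :: xs).all (fun q => q.2 < p.2)) ++
          (if xs.all (fun q => q.2 < x.2) then [x] else []) := by
      rw [List.filter_append, hff]
      congr 1
      by_cases hc : xs.all (fun q => q.2 < x.2) <;> simp [hc]
    have hS : S (x :: xs) = (if xs.all (fun q => q.2 < x.2) then [x] else []) ++ S xs := by
      by_cases hc : xs.all (fun q => q.2 < x.2) <;> simp [S, hc]
    have hlen1 := List.length_filter_le (fun p => decide (x.2 < p.2)) s
    rw [Prod.mk.injEq]
    refine ⟨?_, ?_⟩
    · rw [hfapp, hS, List.append_assoc]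
    · rw [hfapp, hS]
      by_cases hc : xs.all (fun q => q.2 < x.2) <;>
        simp [hc, List.length_append] <;> push_cast [Nat.cast_sub hlen1] <;> ring

theorem leftRight_eq_spec (input : List (Int × Int)) :
    leftRight input = (S input, 2 * (input.length : Int) - ((S input).length : Int)) := by
  unfold leftRight
  rw [aFold_eq input [] 0 (List.Pairwise.nil)]
  simp

theorem leftRight_alt_eq_spec (input : List (Int × Int)) :
    leftRight_alt input = (S input, 2 * (input.length : Int) - ((S input).length : Int)) := by
  unfold leftRight_alt
  rw [List.foldl_reverse, bFold_eq]
  simp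

-- ===== VERDICT (by name: the statement is the Claim_ definition above) =====
theorem leftRight_spec : Claim_equal_leftRight := by
  intro input _
  unfold Spec_leftRight
  rw [leftRight_eq_spec, leftRight_alt_eq_spec]
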